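-- pv_equiv track=rewrite | github.com/pokorj54/2-Euclidean-Preferences | src/permutation.py | block_decomposition
-- ===== SOURCE A (Python) =====
-- def block_decomposition(permutations):
--     start = 0
--     vals = set()
--     blocks = []
--     for i in range(len(permutations[0])):
--         for p in permutations:
--             vals.add(p[i])
--         if len(vals) == i -start +1:
--             blocks.append([list(p[start:i+1]) for p in permutations])
--             start = i+1
--             vals = set()
--     if len(vals) != 0:
--         blocks.append([list(p[start:i+1]) for p in permutations])
--         vals = set()
--     return blocks
-- ===== SOURCE B (Python) =====
-- def block_decomposition(permutations):
--     def split(perms):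
--         width = len(perms[0])
--         for j in range(1, width + 1):
--             if len({p[k] for p in perms for k in range(j)}) == j:
--                 return [[list(p[:j]) for p in perms]] + split([p[j:] for p in perms])
--         if width == 0:
--             return []
--         return [[list(p[:width]) for p in perms]]
--     return split(permutations)
-- ===== Notes on version B (the rewrite author's own statement) =====
-- stated objective: alternative
-- what changed: B replaces A's single stateful left-to-right pass (running set, start/vals mutation, blocks appended inline) by a recursive divide-and-conquer: find the shortest column prefix whose distinct values exactly fill it, emit it as a block, and recurse on the remaining columns.
import Mathlib
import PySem

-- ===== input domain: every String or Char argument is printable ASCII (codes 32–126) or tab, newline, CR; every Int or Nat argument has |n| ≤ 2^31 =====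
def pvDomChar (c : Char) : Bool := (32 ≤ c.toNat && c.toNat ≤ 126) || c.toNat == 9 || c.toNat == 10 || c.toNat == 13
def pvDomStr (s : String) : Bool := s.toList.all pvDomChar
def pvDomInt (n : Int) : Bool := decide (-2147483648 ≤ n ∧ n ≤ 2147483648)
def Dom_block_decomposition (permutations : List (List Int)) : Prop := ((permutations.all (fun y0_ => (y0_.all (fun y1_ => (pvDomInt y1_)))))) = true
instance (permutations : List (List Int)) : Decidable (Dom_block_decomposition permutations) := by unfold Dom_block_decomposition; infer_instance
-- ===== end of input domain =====

-- B replaces A's single stateful pass (running set, start/vals mutation, blocks appended inline)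
-- by a recursive decomposition: find the shortest column prefix whose distinct values exactly
-- fill it, emit it as a block, recurse on the remaining columns; objective: alternative.

-- ===== PORT A =====
-- one loop iteration of A: state = (start, vals, blocks, i_of_last_iteration)
def bdAStep (permutations : List (List Int))
    (st : Int × PySem.Set Int × List (List (List Int)) × Int) (i : Int) :
    Int × PySem.Set Int × List (List (List Int)) × Int :=
  let start := st.1
  let vals := permutations.foldl (fun v p => PySem.Set.add v (PySem.List.pyGetD p i 0)) st.2.1
  let blocks := st.2.2.1
  if PySem.Set.len vals = i - start + 1 then
    (i + 1, PySem.Set.empty,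
     blocks ++ [permutations.map (fun p => PySem.List.slice p (some start) (some (i + 1)))], i)
  else (start, vals, blocks, i)

def block_decomposition (permutations : List (List Int)) : List (List (List Int)) :=
  let row0 := PySem.List.pyGetD permutations 0 []
  -- Python's loop variable i is carried as the 4th state component (initial -1 is never
  -- read: the trailing branch only fires when vals ≠ ∅, i.e. the loop ran)
  let fin := (PySem.List.pyRange 0 (row0.length : Int) 1).foldl (bdAStep permutations)
    (0, PySem.Set.empty, [], -1)
  if PySem.Set.len fin.2.1 ≠ 0 then
    fin.2.2.1 ++ [permutations.map (fun p => PySem.List.slice p (some fin.1) (some (fin.2.2.2 + 1)))]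
  else fin.2.2.1

-- ===== PORT B =====
-- Source B's prefix test: len({p[k] for p in perms for k in range(j)}) == j
def bdCond (perms : List (List Int)) (j : Int) : Bool :=
  PySem.Set.len (PySem.Set.ofList (perms.flatMap
    (fun p => (PySem.List.pyRange 0 j 1).map (fun k => PySem.List.pyGetD p k 0)))) == j

-- cited by bdSplit's decreasing_by, so it must precede it
theorem bdSplit_width_lt (perms : List (List Int)) (j : Int) (h1 : 1 ≤ j)
    (h2 : j < ((PySem.List.pyGetD perms 0 []).length : Int) + 1) :
    (PySem.List.pyGetD (perms.map (fun p => PySem.List.slice p (some j) none)) 0 []).length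
      < (PySem.List.pyGetD perms 0 []).length := by
  cases perms with
  | nil => simp at h2; omega
  | cons p0 rest =>
    simp only [List.map_cons, PySem.List.pyGetD_zero_cons] at h2 ⊢
    rw [PySem.List.slice_from p0 (by omega : (0:Int) ≤ j)]
    simp only [List.length_drop]
    omega

-- Source B's recursive helper 'split': the for-loop with an early return is find?
def bdSplit (perms : List (List Int)) : List (List (List Int)) :=
  let width := (PySem.List.pyGetD perms 0 []).length
  match h : (PySem.List.pyRange 1 ((width : Int) + 1) 1).find? (bdCond perms) with
  | some j =>
      (perms.map (fun p => PySem.List.slice p none (some j))) ::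
        bdSplit (perms.map (fun p => PySem.List.slice p (some j) none))
  | none =>
      if width = 0 then []
      else [perms.map (fun p => PySem.List.slice p none (some (width : Int)))]
termination_by (PySem.List.pyGetD perms 0 []).length
decreasing_by
  have hm := PySem.List.mem_pyRange_one.mp (List.mem_of_find?_eq_some h)
  simpa using bdSplit_width_lt perms j hm.1 hm.2

def block_decomposition_alt (permutations : List (List Int)) : List (List (List Int)) :=
  bdSplit permutations

-- ===== PRECONDITION & SPEC =====
-- Pre_ excludes exactly the inputs where the Python A raises IndexError: the empty list
-- (permutations[0]) and inputs where some row is shorter than row 0 (p[i]).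
def Pre_block_decomposition (permutations : List (List Int)) : Prop :=
  permutations ≠ [] ∧ ∀ p ∈ permutations, (permutations.headD []).length ≤ p.length
instance (permutations : List (List Int)) : Decidable (Pre_block_decomposition permutations) := by
  unfold Pre_block_decomposition; infer_instance

def pvWitness_block_decomposition : List (List Int) := [[0, 1, 3, 2], [1, 0, 2, 3]]

def Spec_block_decomposition (permutations : List (List Int)) (out : List (List (List Int))) : Prop := out = block_decomposition_alt permutations
instance (permutations : List (List Int)) (out : List (List (List Int))) : Decidable (Spec_block_decomposition permutations out) := by unfold Spec_block_decomposition; infer_instance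

-- ===== CLAIM (what is proved, stated in full; the proofs are below) =====
def Claim_equal_block_decomposition : Prop := ∀ (permutations : List (List Int)), Dom_block_decomposition permutations → Pre_block_decomposition permutations → Spec_block_decomposition permutations (block_decomposition permutations)

-- ===== LEMMAS AND PROOFS =====

-- unfolding equations for bdSplit, by the value of the find?
theorem bdSplit_some (perms : List (List Int)) (j : Int)
    (h : (PySem.List.pyRange 1 (((PySem.List.pyGetD perms 0 []).length : Int) + 1) 1).find? (bdCond perms) = some j) :
    bdSplit perms = (perms.map (fun p => PySem.List.slice p none (some j))) ::
        bdSplit (perms.map (fun p => PySem.List.slice p (some j) none)) := by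
  conv_lhs => rw [bdSplit]
  split
  · next j' hj' => rw [hj'] at h; injection h with h; subst h; rfl
  · next hn => rw [hn] at h; exact absurd h (by simp)

theorem bdSplit_none (perms : List (List Int))
    (h : (PySem.List.pyRange 1 (((PySem.List.pyGetD perms 0 []).length : Int) + 1) 1).find? (bdCond perms) = none) :
    bdSplit perms = if (PySem.List.pyGetD perms 0 []).length = 0 then []
      else [perms.map (fun p => PySem.List.slice p none (some ((PySem.List.pyGetD perms 0 []).length : Int)))] := by
  conv_lhs => rw [bdSplit]
  split
  · next j' hj' => rw [hj'] at h; exact absurd h (by simp)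
  · next hn => rfl

-- the values of column m across all rows (with A's pyGetD default)
def pvCol (perms : List (List Int)) (m : Int) : List Int :=
  perms.map (fun p => PySem.List.pyGetD p m 0)

-- the set A's vals variable holds after processing columns s..i-1 since the last reset at s
def pvVals (perms : List (List Int)) (s i : Int) : PySem.Set Int :=
  PySem.Set.ofList ((PySem.List.pyRange s i 1).flatMap (pvCol perms))

theorem pvVals_self (perms : List (List Int)) (s : Int) : pvVals perms s s = PySem.Set.empty := by
  unfold pvVals
  rw [PySem.List.pyRange_one_eq_nil (by omega)]
  rfl

-- A's inner per-column loop advances pvVals by one column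
theorem pvVals_step (perms : List (List Int)) (s i : Int) (hsi : s ≤ i) :
    perms.foldl (fun v p => PySem.Set.add v (PySem.List.pyGetD p i 0)) (pvVals perms s i)
      = pvVals perms s (i + 1) := by
  rw [← PySem.Set.update_map_eq_foldl_add]
  unfold pvVals
  rw [PySem.List.pyRange_one_succ_right hsi, List.flatMap_append, PySem.Set.ofList_append]
  simp [pvCol]

theorem pv_set_len_eq (s : PySem.Set Int) : PySem.Set.len s = (List.length s : Int) := by
  simp [PySem.Set.len]

-- |set(xs)| only depends on xs's members
theorem pv_len_ofList (xs : List Int) :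
    PySem.Set.len (PySem.Set.ofList xs) = (xs.toFinset.card : Int) := by
  have nd := PySem.Set.nodup_ofList (α := Int) xs
  have he : (PySem.Set.ofList xs).toFinset = xs.toFinset := by
    ext a; simp [List.mem_toFinset, PySem.Set.mem_ofList]
  have := List.toFinset_card_of_nodup nd
  rw [he] at this
  simp [PySem.Set.len, ← this]

theorem pv_pyGetD_drop (p : List Int) (n : Nat) (k : Int) (hk : 0 ≤ k) :
    PySem.List.pyGetD (p.drop n) k 0 = PySem.List.pyGetD p ((n : Int) + k) 0 := by
  lift k to Nat using hk
  rw [show ((n : Int) + (k : Int)) = ((n + k : Nat) : Int) from by push_cast; ring,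
    PySem.List.pyGetD_natCast, PySem.List.pyGetD_natCast]
  simp [List.getD_eq_getElem?_getD, List.getElem?_drop]

-- B's prefix test on the tail-sliced input reads exactly A's running-set cardinality
theorem pv_cond_iff (perms : List (List Int)) (s j : Int) (hs : 0 ≤ s) (hj : 0 ≤ j) :
    (bdCond (perms.map (fun p => PySem.List.slice p (some s) none)) j = true)
      ↔ PySem.Set.len (pvVals perms s (s + j)) = j := by
  unfold bdCond pvVals
  rw [beq_iff_eq, pv_len_ofList, pv_len_ofList]
  have hfin : ((perms.map (fun p => PySem.List.slice p (some s) none)).flatMap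
      (fun p => (PySem.List.pyRange 0 j 1).map (fun k => PySem.List.pyGetD p k 0))).toFinset
      = ((PySem.List.pyRange s (s + j) 1).flatMap (pvCol perms)).toFinset := by
    ext x
    simp only [List.mem_toFinset, List.mem_flatMap, List.mem_map, PySem.List.mem_pyRange_one,
      pvCol]
    constructor
    · rintro ⟨q, ⟨p, hp, rfl⟩, ⟨k, ⟨hk0, hkj⟩, rfl⟩⟩
      refine ⟨s + k, ⟨by omega, by omega⟩, p, hp, ?_⟩
      rw [PySem.List.slice_from p hs, pv_pyGetD_drop p s.toNat k hk0]
      congr 1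
      omega
    · rintro ⟨m, ⟨hm1, hm2⟩, p, hp, rfl⟩
      refine ⟨PySem.List.slice p (some s) none, ⟨p, hp, rfl⟩, m - s, ⟨by omega, by omega⟩, ?_⟩
      rw [PySem.List.slice_from p hs, pv_pyGetD_drop p s.toNat (m - s) (by omega)]
      congr 1
      omega
  rw [hfin]

-- find? on an integer range returns the least in-range element satisfying the test
theorem pv_find?_pyRange_some (a b j : Int) (p : Int → Bool) (haj : a ≤ j) (hjb : j < b)
    (hp : p j = true) (hmin : ∀ m, a ≤ m → m < j → p m = false) :
    (PySem.List.pyRange a b 1).find? p = some j := by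
  rw [PySem.List.pyRange_one_cons (lt_of_le_of_lt haj hjb)]
  by_cases hae : a = j
  · subst hae
    simp [hp]
  · have hpa : p a = false := hmin a le_rfl (by omega)
    rw [List.find?_cons_of_neg (by simp [hpa])]
    exact pv_find?_pyRange_some (a + 1) b j p (by omega) hjb hp
      (fun m h1 h2 => hmin m (by omega) h2)
termination_by (j - a).toNat
decreasing_by omega

-- the width row 0 keeps after dropping the first s columns
theorem pv_width_slice (perms : List (List Int)) (s : Int) (hs : 0 ≤ s)
    (hsw : s ≤ ((PySem.List.pyGetD perms 0 []).length : Int)) :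
    ((PySem.List.pyGetD (perms.map (fun p => PySem.List.slice p (some s) none)) 0 []).length : Int)
      = ((PySem.List.pyGetD perms 0 []).length : Int) - s := by
  cases perms with
  | nil => simp at hsw ⊢; omega
  | cons p0 rest =>
    simp only [List.map_cons, PySem.List.pyGetD_zero_cons] at hsw ⊢
    rw [PySem.List.slice_from p0 hs]
    simp only [List.length_drop]
    omega

-- A's post-loop trailing-block step
def pvPost (perms : List (List Int)) (fin : Int × PySem.Set Int × List (List (List Int)) × Int) :
    List (List (List Int)) :=
  if PySem.Set.len fin.2.1 ≠ 0 then
    fin.2.2.1 ++ [perms.map (fun p => PySem.List.slice p (some fin.1) (some (fin.2.2.2 + 1)))]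
  else fin.2.2.1

-- main correspondence: A's loop resumed at column i with a fresh accumulation started at s
-- (invariants: vals = pvVals s i, last loop variable = i - 1, no boundary was hit in [s, i))
-- computes bl followed by B's recursive split of the columns from s on
theorem pv_main_loop (perms : List (List Int)) (fuel : Nat) :
    ∀ (s i : Int) (bl : List (List (List Int))), 0 ≤ s → s ≤ i →
    i ≤ ((PySem.List.pyGetD perms 0 []).length : Int) →
    ((((PySem.List.pyGetD perms 0 []).length : Int)) - i).toNat = fuel →
    (∀ m, s ≤ m → m < i → ¬ PySem.Set.len (pvVals perms s (m + 1)) = m - s + 1) →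
    pvPost perms ((PySem.List.pyRange i ((PySem.List.pyGetD perms 0 []).length : Int) 1).foldl
        (bdAStep perms) (s, pvVals perms s i, bl, i - 1))
      = bl ++ bdSplit (perms.map (fun p => PySem.List.slice p (some s) none)) := by
  induction fuel with
  | zero =>
    intro s i bl hs hsi hiw hfuel hnb
    obtain rfl : i = ((PySem.List.pyGetD perms 0 []).length : Int) := by omega
    rw [PySem.List.pyRange_one_eq_nil le_rfl, List.foldl_nil]
    have hv := pv_width_slice perms s hs (by omega)
    by_cases hsw : s = ((PySem.List.pyGetD perms 0 []).length : Int)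
    · -- empty final segment: vals is empty, no trailing block
      have hw0 : (PySem.List.pyGetD (perms.map (fun p => PySem.List.slice p (some s) none)) 0 []).length = 0 := by omega
      have hempty : pvVals perms s ((PySem.List.pyGetD perms 0 []).length : Int) = PySem.Set.empty := by
        rw [← hsw]; exact pvVals_self perms s
      rw [bdSplit_none _ (by rw [hw0]; rw [show ((0:Nat):Int) + 1 = 1 from by norm_num,
        PySem.List.pyRange_one_eq_nil (by omega)]; rfl)]
      rw [hempty, if_pos hw0]
      simp [pvPost, PySem.Set.empty]
    · -- non-empty trailing block on both sides
      have hslt : s < ((PySem.List.pyGetD perms 0 []).length : Int) := by omega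
      cases perms with
      | nil => simp at hslt; omega
      | cons p0 rest =>
        have hmem : PySem.List.pyGetD p0 s 0 ∈ pvVals (p0 :: rest) s ((PySem.List.pyGetD (p0 :: rest) 0 []).length : Int) := by
          unfold pvVals
          rw [PySem.Set.mem_ofList]
          exact List.mem_flatMap.mpr ⟨s, PySem.List.mem_pyRange_one.mpr ⟨le_rfl, hslt⟩,
            List.mem_map.mpr ⟨p0, List.mem_cons_self, rfl⟩⟩
        have hlen : PySem.Set.len (pvVals (p0 :: rest) s ((PySem.List.pyGetD (p0 :: rest) 0 []).length : Int)) ≠ 0 := by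
          rw [pv_set_len_eq]
          have := List.length_pos_of_mem hmem
          omega
        have hfind : ((PySem.List.pyRange 1
            (((PySem.List.pyGetD ((p0 :: rest).map (fun p => PySem.List.slice p (some s) none)) 0 []).length : Int) + 1) 1).find?
            (bdCond ((p0 :: rest).map (fun p => PySem.List.slice p (some s) none)))) = none := by
          rw [List.find?_eq_none]
          intro j hj
          have hjr := PySem.List.mem_pyRange_one.mp hj
          cases hcond : bdCond ((p0 :: rest).map (fun p => PySem.List.slice p (some s) none)) j with
          | false => simp
          | true =>
            exfalso
            have hcl := (pv_cond_iff (p0 :: rest) s j hs (by omega)).mp hcond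
            have h' := hnb (s + j - 1) (by omega) (by omega)
            rw [show s + j - 1 + 1 = s + j from by ring] at h'
            rw [show s + j - 1 - s + 1 = j from by ring] at h'
            exact h' hcl
        rw [bdSplit_none _ hfind]
        have hwpos : (PySem.List.pyGetD ((p0 :: rest).map (fun p => PySem.List.slice p (some s) none)) 0 []).length ≠ 0 := by omega
        rw [if_neg hwpos]
        unfold pvPost
        dsimp only
        rw [if_pos (by simpa using hlen)]
        congr 2
        rw [show ((PySem.List.pyGetD (p0 :: rest) 0 []).length : Int) - 1 + 1
          = ((PySem.List.pyGetD (p0 :: rest) 0 []).length : Int) from by ring]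
        rw [List.map_map]
        apply List.map_congr_left
        intro p hp
        simp only [Function.comp]
        rw [PySem.List.slice_from p hs,
          PySem.List.slice_to_natCast,
          PySem.List.slice_toNat p hs (by positivity)]
        congr 1
        omega
  | succ f ih =>
    intro s i bl hs hsi hiw hfuel hnb
    have hiw2 : i < ((PySem.List.pyGetD perms 0 []).length : Int) := by omega
    rw [PySem.List.pyRange_one_cons hiw2, List.foldl_cons]
    have hv := pv_width_slice perms s hs (by omega)
    by_cases hc : PySem.Set.len (pvVals perms s (i + 1)) = i - s + 1
    · -- boundary at column i: A emits a block and resets; B's find? returns j = i - s + 1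
      have hstep : bdAStep perms (s, pvVals perms s i, bl, i - 1) i
          = (i + 1, PySem.Set.empty,
             bl ++ [perms.map (fun p => PySem.List.slice p (some s) (some (i + 1)))], i) := by
        unfold bdAStep
        rw [pvVals_step perms s i hsi]
        simp only [hc, if_pos]
      rw [hstep]
      have hrec := ih (i + 1) (i + 1) (bl ++ [perms.map (fun p => PySem.List.slice p (some s) (some (i + 1)))])
        (by omega) le_rfl (by omega) (by omega) (by intro m h1 h2; omega)
      rw [pvVals_self, show i + 1 - 1 = i from by ring] at hrec
      rw [hrec]
      have hfind : ((PySem.List.pyRange 1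
          (((PySem.List.pyGetD (perms.map (fun p => PySem.List.slice p (some s) none)) 0 []).length : Int) + 1) 1).find?
          (bdCond (perms.map (fun p => PySem.List.slice p (some s) none)))) = some (i - s + 1) := by
        apply pv_find?_pyRange_some 1 _ (i - s + 1) _ (by omega) (by omega)
        · apply (pv_cond_iff perms s (i - s + 1) hs (by omega)).mpr
          rw [show s + (i - s + 1) = i + 1 from by ring]
          omega
        · intro m h1 h2
          cases hcond : bdCond (perms.map (fun p => PySem.List.slice p (some s) none)) m with
          | false => rfl
          | true =>
            exfalso
            have hcl := (pv_cond_iff perms s m hs (by omega)).mp hcond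
            have h' := hnb (s + m - 1) (by omega) (by omega)
            rw [show s + m - 1 + 1 = s + m from by ring] at h'
            rw [show s + m - 1 - s + 1 = m from by ring] at h'
            exact h' hcl
      rw [bdSplit_some _ _ hfind]
      have hblk : (perms.map (fun p => PySem.List.slice p (some s) none)).map
            (fun p => PySem.List.slice p none (some (i - s + 1)))
          = perms.map (fun p => PySem.List.slice p (some s) (some (i + 1))) := by
        rw [List.map_map]
        apply List.map_congr_left
        intro p hp
        simp only [Function.comp]
        rw [PySem.List.slice_from p hs, PySem.List.slice_to _ (by omega : (0:Int) ≤ i - s + 1),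
          PySem.List.slice_toNat p hs (by omega : (0:Int) ≤ i + 1)]
        congr 1
        omega
      have htails : (perms.map (fun p => PySem.List.slice p (some s) none)).map
            (fun p => PySem.List.slice p (some (i - s + 1)) none)
          = perms.map (fun p => PySem.List.slice p (some (i + 1)) none) := by
        rw [List.map_map]
        apply List.map_congr_left
        intro p hp
        simp only [Function.comp]
        rw [PySem.List.slice_from p hs,
          PySem.List.slice_from _ (by omega : (0:Int) ≤ i - s + 1),
          PySem.List.slice_from p (by omega : (0:Int) ≤ i + 1),
          List.drop_drop]
        congr 1
        omega
      rw [hblk, htails]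
      simp [List.append_assoc]
    · -- no boundary at column i: both sides keep scanning
      have hstep : bdAStep perms (s, pvVals perms s i, bl, i - 1) i
          = (s, pvVals perms s (i + 1), bl, i) := by
        unfold bdAStep
        rw [pvVals_step perms s i hsi]
        simp only [hc, ite_false]
      rw [hstep]
      have hrec := ih s (i + 1) bl hs (by omega) (by omega) (by omega)
        (by
          intro m h1 h2
          by_cases hm : m = i
          · subst hm; exact hc
          · exact hnb m h1 (by omega))
      rw [show i + 1 - 1 = i from by ring] at hrec
      exact hrec

theorem pv_main (perms : List (List Int)) :
    block_decomposition perms = block_decomposition_alt perms := by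
  have h := pv_main_loop perms ((PySem.List.pyGetD perms 0 []).length) 0 0 []
    le_rfl le_rfl (Int.natCast_nonneg _) (by omega) (by intro m h1 h2; omega)
  rw [pvVals_self] at h
  have hid : perms.map (fun p => PySem.List.slice p (some 0) none) = perms := by
    simp [PySem.List.slice_none_none]
  rw [hid] at h
  unfold block_decomposition block_decomposition_alt
  simpa [pvPost] using h

-- ===== VERDICT (by name: the statement is the Claim_ definition above) =====
theorem block_decomposition_spec : Claim_equal_block_decomposition := by
  intro perms _ _
  unfold Spec_block_decomposition
  exact pv_main perms
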